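-- pv_equiv track=rewrite | github.com/hyebinnn/Algorithm | BOJ/N_카펫.py | solution
-- ===== SOURCE A (Python) =====
-- def solution(brown, yellow):
--     answer = []
--     arr = []  # 약수 들어가있는 리스트
--     brown = brown - 4
--     if yellow == 1:
--         answer = [3, 3]
--     else:
--         for x in range(1, yellow + 1):
--             if yellow % x == 0:
--                 arr.append(x)
--             if x ** 2 == yellow:
--                 arr.append(x)
--
--         for i in range(len(arr) // 2):
--             h = arr[i]
--             w = arr[-(i + 1)]
--             result = w * 2 + h * 2
--             if result == brown:
--                 answer = [w + 2, h + 2]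
--                 break
--     return answer
-- ===== SOURCE B (Python) =====
-- def solution(brown, yellow):
--     # Enumerate divisors d of yellow only up to sqrt(yellow); pair d with yellow//d.
--     target = brown - 4
--     d = 1
--     while d * d <= yellow:
--         if yellow % d == 0:
--             w = yellow // d
--             if 2 * (d + w) == target:
--                 return [w + 2, d + 2]
--         d += 1
--     return []
-- ===== Notes on version B (the rewrite author's own statement) =====
-- stated objective: faster
-- what changed: A enumerates every x in 1..yellow to build the full sorted divisor list and then scans index pairs from both ends; B enumerates d only up to sqrt(yellow), pairing each divisor d directly with yellow//d, with no list built and no yellow==1 special case.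
-- intended difference: On yellow = 1 with brown != 8 (inputs that describe no carpet) A's shortcut returns [3, 3] regardless of brown, while B returns [], the intended 'no solution' answer consistent with A's own behaviour on every other unsolvable input. — e.g. on solution(5, 1): A returns [3, 3], B returns []
import Mathlib
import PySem

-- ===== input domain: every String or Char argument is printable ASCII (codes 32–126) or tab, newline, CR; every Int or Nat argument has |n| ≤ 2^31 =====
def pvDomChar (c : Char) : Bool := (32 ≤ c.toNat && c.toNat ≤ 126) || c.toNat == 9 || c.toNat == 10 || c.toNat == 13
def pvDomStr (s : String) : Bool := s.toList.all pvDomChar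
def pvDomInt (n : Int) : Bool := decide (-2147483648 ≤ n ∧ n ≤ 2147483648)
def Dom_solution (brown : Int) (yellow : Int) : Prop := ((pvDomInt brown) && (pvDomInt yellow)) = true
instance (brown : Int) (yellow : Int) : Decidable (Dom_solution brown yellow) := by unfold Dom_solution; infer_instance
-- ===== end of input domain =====

-- B replaces A's O(yellow) scan over all divisors with an O(sqrt(yellow)) scan pairing d with yellow//d;
-- on the degenerate input yellow = 1 with brown ≠ 8 (no such carpet) A's shortcut returns [3,3], B returns [].

-- ===== PORT A =====
-- second loop of A, with break: recursion over the index list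
def solutionLoop (brown2 : Int) (arr : List Int) : List Int → List Int
  | [] => []
  | i :: rest =>
    let h := PySem.List.pyGetD arr i 0
    let w := PySem.List.pyGetD arr (-(i + 1)) 0
    let result := w * 2 + h * 2
    if result = brown2 then [w + 2, h + 2] else solutionLoop brown2 arr rest

def solution (brown : Int) (yellow : Int) : List Int :=
  let brown2 := brown - 4
  if yellow = 1 then [3, 3]
  else
    let arr := (PySem.List.pyRange 1 (yellow + 1) 1).foldl (fun arr x =>
      let arr1 := if PySem.Int.mod yellow x = 0 then arr ++ [x] else arr
      if x ^ 2 = yellow then arr1 ++ [x] else arr1) []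
    solutionLoop brown2 arr (PySem.List.pyRange 0 (PySem.Int.floordiv (PySem.List.len arr) 2) 1)

-- ===== PORT B =====
-- B's while loop over d (d*d <= yellow); fuel only makes the same computation total
def solutionAltLoop (target : Int) (yellow : Int) : Nat → Nat → List Int
  | _, 0 => []
  | d, fuel + 1 =>
    if (d : Int) * (d : Int) ≤ yellow then
      if PySem.Int.mod yellow (d : Int) = 0 then
        let w := PySem.Int.floordiv yellow (d : Int)
        if 2 * ((d : Int) + w) = target then [w + 2, (d : Int) + 2]
        else solutionAltLoop target yellow (d + 1) fuel
      else solutionAltLoop target yellow (d + 1) fuel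
    else []

def solution_alt (brown : Int) (yellow : Int) : List Int :=
  solutionAltLoop (brown - 4) yellow 1 (yellow.toNat + 1)

-- ===== PRECONDITION & SPEC =====
-- On yellow = 1 with brown ≠ 8 (inputs describing no carpet) A's shortcut returns [3,3] regardless of
-- brown, while B returns [] — the intended "no solution" answer, consistent with A's own behaviour on
-- every other unsolvable input.
def D_solution (brown : Int) (yellow : Int) : Prop := yellow = 1 ∧ brown ≠ 8
instance (brown : Int) (yellow : Int) : Decidable (D_solution brown yellow) := by unfold D_solution; infer_instance

def Spec_solution (brown : Int) (yellow : Int) (out : List Int) : Prop :=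
  ¬ D_solution brown yellow → out = solution_alt brown yellow
instance (brown : Int) (yellow : Int) (out : List Int) : Decidable (Spec_solution brown yellow out) := by unfold Spec_solution; infer_instance

def pvDiffWitness_solution : Int × Int := (5, 1)
def pvDiffWitnessOut_solution : (List Int) × (List Int) := ([3, 3], [])

-- ===== CLAIM (what is proved, stated in full; the proofs are below) =====
def Claim_unchanged_solution : Prop := ∀ (brown : Int) (yellow : Int), Dom_solution brown yellow → Spec_solution brown yellow (solution brown yellow)
def Claim_changed_solution : Prop := Dom_solution (pvDiffWitness_solution.1) (pvDiffWitness_solution.2) ∧ D_solution (pvDiffWitness_solution.1) (pvDiffWitness_solution.2) ∧ solution (pvDiffWitness_solution.1) (pvDiffWitness_solution.2) = pvDiffWitnessOut_solution.1 ∧ solution_alt (pvDiffWitness_solution.1) (pvDiffWitness_solution.2) = pvDiffWitnessOut_solution.2 ∧ pvDiffWitnessOut_solution.1 ≠ pvDiffWitnessOut_solution.2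
def Claim_exact_solution : Prop := ∀ (brown : Int) (yellow : Int), Dom_solution brown yellow → D_solution brown yellow → solution brown yellow ≠ solution_alt brown yellow

-- ===== LEMMAS AND PROOFS =====

-- common shape both loops reduce to: first small divisor d with 2*(d + y/d) = t
def pvScan (t y : Int) : List Int → List Int
  | [] => []
  | d :: rest => if 2 * (d + y / d) = t then [y / d + 2, d + 2] else pvScan t y rest

lemma altLoop_eq_scan (t y r : Int) (hr0 : 0 ≤ r) (hr1 : r * r ≤ y) (hr2 : y < (r + 1) * (r + 1)) :
    ∀ (fuel d : Nat), 1 ≤ d → r + 1 - d ≤ fuel →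
      solutionAltLoop t y d fuel
        = pvScan t y ((PySem.List.pyRange d (r + 1) 1).filter (fun x => PySem.Int.mod y x == 0)) := by
  intro fuel
  induction fuel with
  | zero =>
    intro d hd hf
    rw [PySem.List.pyRange_one_eq_nil (by push_cast at hf ⊢; omega)]
    simp [solutionAltLoop, pvScan]
  | succ fuel ih =>
    intro d hd hf
    have hdpos : (0 : Int) < (d : Int) := by exact_mod_cast hd
    by_cases hdr : (d : Int) ≤ r
    · have hcond : (d : Int) * (d : Int) ≤ y :=
        le_trans (mul_le_mul hdr hdr (le_of_lt hdpos) hr0) hr1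
      rw [PySem.List.pyRange_one_cons (by omega)]
      rw [solutionAltLoop]
      rw [if_pos hcond]
      rw [PySem.Int.mod_eq_emod_of_pos hdpos]
      by_cases hdvd : y % (d : Int) = 0
      · rw [if_pos hdvd]
        have hb : (PySem.Int.mod y (d : Int) == 0) = true := by
          rw [PySem.Int.mod_eq_emod_of_pos hdpos]; simpa using hdvd
        simp only [List.filter_cons, hb, if_true, pvScan]
        rw [PySem.Int.floordiv_eq_ediv_of_pos hdpos]
        by_cases hhit : 2 * ((d : Int) + y / (d : Int)) = t
        · rw [if_pos hhit, if_pos hhit]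
        · rw [if_neg hhit, if_neg hhit]
          have h2 := ih (d + 1) (by omega) (by push_cast; push_cast at hf; omega)
          push_cast at h2
          rw [h2]
      · rw [if_neg hdvd]
        have hb : (PySem.Int.mod y (d : Int) == 0) = false := by
          rw [PySem.Int.mod_eq_emod_of_pos hdpos]; simpa using hdvd
        simp only [List.filter_cons, hb, Bool.false_eq_true, if_false]
        have h2 := ih (d + 1) (by omega) (by push_cast; push_cast at hf; omega)
        push_cast at h2
        rw [h2]
    · have hcond : ¬ ((d : Int) * (d : Int) ≤ y) := by
        intro hle
        have : (r + 1) * (r + 1) ≤ (d : Int) * (d : Int) :=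
          mul_le_mul (by omega) (by omega) (by omega) (by omega)
        linarith
      rw [solutionAltLoop, if_neg hcond, PySem.List.pyRange_one_eq_nil (by omega)]
      simp [pvScan]

lemma flatMap_ite_pair (p : Int → Bool) (q : Int → Prop) [DecidablePred q] (l : List Int)
    (hq : ∀ x ∈ l, ¬ q x) :
    l.flatMap (fun x => (if p x then [x] else []) ++ (if q x then [x] else []))
      = l.filter p := by
  induction l with
  | nil => simp
  | cons a l ih =>
    simp only [List.flatMap_cons, List.filter_cons]
    rw [if_neg (hq a (by simp)), ih (fun x hx => hq x (by simp [hx]))]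
    by_cases hp : p a <;> simp [hp]

lemma arr_eq_parts (y r : Int) (hr3 : 1 ≤ r) (hr1 : r * r ≤ y) (hr2 : y < (r + 1) * (r + 1)) :
    ((PySem.List.pyRange 1 (y + 1) 1).foldl (fun arr x =>
        let arr1 := if PySem.Int.mod y x = 0 then arr ++ [x] else arr
        if x ^ 2 = y then arr1 ++ [x] else arr1) [])
      = (PySem.List.pyRange 1 (r + 1) 1).filter (fun x => PySem.Int.mod y x == 0)
        ++ ((if r * r = y then [r] else [])
        ++ (PySem.List.pyRange (r + 1) (y + 1) 1).filter (fun x => PySem.Int.mod y x == 0)) := by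
  have hry : r ≤ y := le_trans (le_mul_of_one_le_left (by omega) hr3) hr1
  rw [PySem.List.foldl_congr_mem _ _ (fun acc x => acc ++
        ((if (PySem.Int.mod y x == 0 : Bool) then [x] else []) ++ (if x ^ 2 = y then [x] else []))) _
      (by intro acc x _
          by_cases h1 : PySem.Int.mod y x = 0 <;> by_cases h2 : x ^ 2 = y <;>
            simp [h1, h2])]
  rw [PySem.List.foldl_append_eq_flatMap, List.nil_append]
  rw [PySem.List.pyRange_one_append 1 (r + 1) (y + 1) (by omega) (by omega)]
  rw [List.flatMap_append]
  have hbig : (PySem.List.pyRange (r + 1) (y + 1) 1).flatMap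
      (fun x => (if (PySem.Int.mod y x == 0 : Bool) then [x] else []) ++ (if x ^ 2 = y then [x] else []))
      = (PySem.List.pyRange (r + 1) (y + 1) 1).filter (fun x => PySem.Int.mod y x == 0) := by
    apply flatMap_ite_pair
    intro x hx
    rw [PySem.List.mem_pyRange_one] at hx
    have : (r + 1) * (r + 1) ≤ x * x := mul_le_mul (by omega) (by omega) (by omega) (by omega)
    rw [pow_two]
    intro he; rw [he] at this; linarith
  rw [hbig]
  rw [PySem.List.pyRange_one_succ_right (show (1:Int) ≤ r from hr3)]
  rw [List.flatMap_append, List.filter_append]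
  have hsmall : (PySem.List.pyRange 1 r 1).flatMap
      (fun x => (if (PySem.Int.mod y x == 0 : Bool) then [x] else []) ++ (if x ^ 2 = y then [x] else []))
      = (PySem.List.pyRange 1 r 1).filter (fun x => PySem.Int.mod y x == 0) := by
    apply flatMap_ite_pair
    intro x hx
    rw [PySem.List.mem_pyRange_one] at hx
    have : x * x ≤ (r - 1) * (r - 1) := mul_le_mul (by omega) (by omega) (by omega) (by omega)
    have h2 : (r - 1) * (r - 1) < r * r := by nlinarith
    rw [pow_two]
    intro he; rw [he] at this; linarith
  rw [hsmall]
  have : (r : Int) ^ 2 = r * r := pow_two r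
  simp only [List.flatMap_cons, List.flatMap_nil, List.filter_cons, List.filter_nil, this,
    List.append_nil, List.append_assoc]

lemma pred_iff_dvd (y x : Int) (_hx : 0 < x) : ((PySem.Int.mod y x == 0) = true) ↔ x ∣ y := by
  rw [beq_iff_eq, PySem.Int.mod_eq_zero_iff_dvd]

lemma mem_smalls_iff (y r a : Int) :
    a ∈ (PySem.List.pyRange 1 (r + 1) 1).filter (fun x => PySem.Int.mod y x == 0)
      ↔ (1 ≤ a ∧ a ≤ r ∧ a ∣ y) := by
  rw [List.mem_filter, PySem.List.mem_pyRange_one]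
  constructor
  · rintro ⟨⟨h1, h2⟩, hp⟩
    exact ⟨h1, by omega, (pred_iff_dvd y a (by omega)).1 hp⟩
  · rintro ⟨h1, h2, h3⟩
    exact ⟨⟨h1, by omega⟩, (pred_iff_dvd y a (by omega)).2 h3⟩

lemma involution (y r : Int) (hr3 : 1 ≤ r) (hr1 : r * r ≤ y) (hr2 : y < (r + 1) * (r + 1)) :
    ((if r * r = y then [r] else [])
        ++ (PySem.List.pyRange (r + 1) (y + 1) 1).filter (fun x => PySem.Int.mod y x == 0))
      = ((((PySem.List.pyRange 1 (r + 1) 1).filter (fun x => PySem.Int.mod y x == 0)).map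
          (fun d => y / d)).reverse) := by
  have hy1 : (1 : Int) ≤ y := le_trans (by nlinarith) hr1
  set smalls := (PySem.List.pyRange 1 (r + 1) 1).filter (fun x => PySem.Int.mod y x == 0) with hsm
  -- antitone fact
  have hanti : ∀ a b : Int, 1 ≤ a → a ∣ y → 1 ≤ b → b ∣ y → a < b → y / b < y / a := by
    intro a b ha had hb hbd hab
    have hpa : y / a * a = y := Int.ediv_mul_cancel had
    have hpb : y / b * b = y := Int.ediv_mul_cancel hbd
    have hqb : 1 ≤ y / b := by nlinarith
    have : y / b * a < y / a * a := by nlinarith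
    exact lt_of_mul_lt_mul_right this (by omega)
  have hqpos : ∀ a : Int, 1 ≤ a → a ∣ y → 1 ≤ y / a ∧ y / a ∣ y ∧ y / a * a = y := by
    intro a ha had
    have hpa : y / a * a = y := Int.ediv_mul_cancel had
    exact ⟨by nlinarith, ⟨a, hpa.symm⟩, hpa⟩
  -- Pairwise (<) of LHS
  have P1 : List.Pairwise (· < ·) ((if r * r = y then [r] else [])
      ++ (PySem.List.pyRange (r + 1) (y + 1) 1).filter (fun x => PySem.Int.mod y x == 0)) := by
    rw [List.pairwise_append]
    refine ⟨by split <;> simp, (PySem.List.pairwise_lt_pyRange_one _ _).filter _, ?_⟩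
    intro a ha b hb
    have ha' : a = r := by revert ha; split <;> simp_all
    have hb' : r + 1 ≤ b := by
      rcases (List.mem_filter.1 hb).1 with h
      rw [PySem.List.mem_pyRange_one] at h; omega
    omega
  -- Pairwise (<) of RHS
  have P2 : List.Pairwise (· < ·) ((smalls.map (fun d => y / d)).reverse) := by
    rw [List.pairwise_reverse, List.pairwise_map]
    have hs : List.Pairwise (· < ·) smalls := (PySem.List.pairwise_lt_pyRange_one _ _).filter _
    refine List.Pairwise.imp_of_mem ?_ hs
    intro a b ha hb hab
    rcases (mem_smalls_iff y r a).1 ha with ⟨ha1, _, had⟩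
    rcases (mem_smalls_iff y r b).1 hb with ⟨hb1, _, hbd⟩
    exact hanti a b ha1 had hb1 hbd hab
  -- Permutation
  have hperm : ((if r * r = y then [r] else [])
      ++ (PySem.List.pyRange (r + 1) (y + 1) 1).filter (fun x => PySem.Int.mod y x == 0)).Perm
      ((smalls.map (fun d => y / d)).reverse) := by
    apply List.perm_of_nodup_nodup_toFinset_eq
    · exact P1.imp (fun h => ne_of_lt h)
    · exact P2.imp (fun h => ne_of_lt h)
    · apply Finset.ext
      intro a
      simp only [List.mem_toFinset]
      rw [List.mem_reverse, List.mem_map]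
      constructor
      · intro h
        rcases List.mem_append.1 h with h | h
        · -- a = r, r * r = y
          have hrr : r * r = y ∧ a = r := by revert h; split <;> simp_all
          refine ⟨r, (mem_smalls_iff y r r).2 ⟨hr3, le_refl r, ⟨r, hrr.1.symm⟩⟩, ?_⟩
          rw [hrr.2, ← hrr.1]
          exact Int.mul_ediv_cancel _ (by omega)
        · rcases List.mem_filter.1 h with ⟨hmem, hp⟩
          rw [PySem.List.mem_pyRange_one] at hmem
          have hady : a ∣ y := (pred_iff_dvd y a (by omega)).1 hp
          refine ⟨y / a, (mem_smalls_iff y r (y / a)).2 ⟨?_, ?_, ?_⟩, ?_⟩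
          · exact (hqpos a (by omega) hady).1
          · -- y / a ≤ r
            by_contra hc
            push Not at hc
            have hprod := (hqpos a (by omega) hady).2.2
            have : (r + 1) * (r + 1) ≤ (y / a) * a :=
              mul_le_mul (by omega) (by omega) (by omega) (by nlinarith)
            linarith
          · exact (hqpos a (by omega) hady).2.1
          · -- y / (y / a) = a
            have hprod := (hqpos a (by omega) hady).2.2
            have hq1 := (hqpos a (by omega) hady).1
            calc y / (y / a) = (y / a * a) / (y / a) := by rw [hprod]
              _ = a := by rw [mul_comm]; exact Int.mul_ediv_cancel _ (by omega)
      · rintro ⟨d, hd, rfl⟩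
        rcases (mem_smalls_iff y r d).1 hd with ⟨hd1, hd2, hdd⟩
        rcases hqpos d hd1 hdd with ⟨hq1, hqd, hprod⟩
        rcases le_or_gt (y / d) r with hle | hlt
        · -- then y / d = r and r * r = y
          have h1 : y / d * d ≤ r * d := mul_le_mul_of_nonneg_right hle (by omega)
          have h2 : r * d ≤ r * r := mul_le_mul_of_nonneg_left hd2 (by omega)
          have e1 : y / d * d = r * d := by linarith
          have e2 : r * d = r * r := by linarith
          have ha : y / d = r := mul_right_cancel₀ (by omega) e1
          have hrr : r * r = y := by linarith
          apply List.mem_append.2 (Or.inl _)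
          rw [if_pos hrr, ha]; simp
        · apply List.mem_append.2 (Or.inr _)
          rw [List.mem_filter, PySem.List.mem_pyRange_one]
          have hydy : y / d ≤ y := by nlinarith
          exact ⟨⟨by omega, by omega⟩, (pred_iff_dvd y (y / d) (by omega)).2 hqd⟩
  exact List.Perm.eq_of_pairwise (fun a b _ _ h1 h2 => absurd h1 (asymm h2)) P1 P2 hperm

lemma loop2_eq_scan (t y : Int) (S : List Int) :
    ∀ (j : Nat), j ≤ S.length →
      solutionLoop t (S ++ (S.map (fun d => y / d)).reverse)
          (PySem.List.pyRange (j : Int) (S.length : Int) 1)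
        = pvScan t y (S.drop j) := by
  set T := (S.map (fun d => y / d)).reverse with hT
  have hTlen : T.length = S.length := by simp [hT]
  have harrlen : (S ++ T).length = S.length + S.length := by simp [hTlen]
  intro j hj
  generalize hgen : S.length - j = n
  induction n generalizing j with
  | zero =>
    have hje : j = S.length := by omega
    subst hje
    rw [PySem.List.pyRange_one_eq_nil (le_refl _), List.drop_length]
    simp [solutionLoop, pvScan]
  | succ n ih =>
    have hjlt : j < S.length := by omega
    rw [PySem.List.pyRange_one_cons (by exact_mod_cast hjlt)]
    simp only [solutionLoop]
    have hh : PySem.List.pyGetD (S ++ T) (j : Int) 0 = S[j] := by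
      rw [PySem.List.pyGetD_natCast, List.getD_eq_getElem _ _ (by omega),
        List.getElem_append_left hjlt]
    have hidx : (-((j : Int) + 1)) = -(((j + 1 : Nat) : Int)) := by push_cast; ring
    have hw : PySem.List.pyGetD (S ++ T) (-((j : Int) + 1)) 0 = y / S[j] := by
      rw [hidx, PySem.List.pyGetD_neg_natCast (S ++ T) (j + 1) 0 (by omega) (by omega)]
      have hge : S.length ≤ (S ++ T).length - (j + 1) := by omega
      rw [List.getElem_append_right hge]
      have hk : (S ++ T).length - (j + 1) - S.length = S.length - j - 1 := by omega
      simp only [hk]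
      simp only [hT, List.getElem_reverse, List.getElem_map, List.length_map]
      have hi : S.length - 1 - (S.length - j - 1) = j := by omega
      exact congrArg (fun z => y / z) (getElem_congr rfl hi (by omega))
    rw [hh, hw]
    rw [List.drop_eq_getElem_cons hjlt]
    simp only [pvScan]
    rw [show y / S[j] * 2 + S[j] * 2 = 2 * (S[j] + y / S[j]) from by ring]
    by_cases hc : 2 * (S[j] + y / S[j]) = t
    · rw [if_pos hc, if_pos hc]
    · rw [if_neg hc, if_neg hc]
      have := ih (j + 1) (by omega) (by omega)
      push_cast at this
      rw [this]

lemma main_eq (b y : Int) (hy : 2 ≤ y) : solution b y = solution_alt b y := by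
  set r : Int := (Nat.sqrt y.toNat : Int) with hrdef
  have hr0 : (0 : Int) ≤ r := by positivity
  have hr1 : r * r ≤ y := by
    have h := Nat.sqrt_le' y.toNat
    have h2 := Int.ofNat_le.2 h
    push_cast at h2
    rw [Int.toNat_of_nonneg (by omega)] at h2
    rw [pow_two] at h2
    exact h2
  have hr2 : y < (r + 1) * (r + 1) := by
    have h := Nat.lt_succ_sqrt' y.toNat
    have h2 := Int.ofNat_lt.2 h
    push_cast at h2
    rw [Int.toNat_of_nonneg (by omega)] at h2
    rw [pow_two] at h2
    exact h2
  have hr3 : (1 : Int) ≤ r := by nlinarith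
  have hry : r ≤ y := le_trans (le_mul_of_one_le_left hr0 hr3) hr1
  set S := (PySem.List.pyRange 1 (r + 1) 1).filter (fun x => PySem.Int.mod y x == 0) with hS
  have hA : solution b y = pvScan (b - 4) y S := by
    simp only [solution]
    rw [if_neg (by omega)]
    rw [arr_eq_parts y r hr3 hr1 hr2, involution y r hr3 hr1 hr2]
    rw [← hS]
    have hfd : PySem.Int.floordiv
        (PySem.List.len (S ++ (S.map (fun d => y / d)).reverse)) 2 = (S.length : Int) := by
      rw [PySem.List.len_eq]
      have hlen : ((S ++ (S.map (fun d => y / d)).reverse).length) = S.length + S.length := by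
        simp
      rw [hlen, PySem.Int.floordiv_eq_ediv_of_pos (by norm_num)]
      push_cast
      omega
    rw [hfd]
    have h0 := loop2_eq_scan (b - 4) y S 0 (by omega)
    simpa using h0
  have hB : solution_alt b y = pvScan (b - 4) y S := by
    simp only [solution_alt]
    have h1 := altLoop_eq_scan (b - 4) y r hr0 hr1 hr2 (y.toNat + 1) 1 (le_refl 1)
      (by push_cast; omega)
    simpa using h1
  rw [hA, hB]

-- ===== VERDICT (by name: the statement is the Claim_ definition above) =====
theorem solution_spec : Claim_unchanged_solution := by
  intro b y _ hD
  rcases lt_or_ge y 2 with hy | hy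
  · rcases lt_or_ge y 1 with hy0 | hy1
    · -- y ≤ 0: both return []
      have hA : solution b y = [] := by
        simp only [solution]
        rw [if_neg (by omega), PySem.List.pyRange_one_eq_nil (by omega)]
        simp only [List.foldl_nil]
        have h0 : PySem.Int.floordiv (PySem.List.len ([] : List Int)) 2 = 0 := by decide
        rw [h0, PySem.List.pyRange_one_eq_nil (le_refl 0)]
        rfl
      have hB : solution_alt b y = [] := by
        have h0 : y.toNat = 0 := by omega
        simp only [solution_alt, h0]
        simp only [solutionAltLoop]
        rw [if_neg (by push_cast; omega)]
      rw [hA, hB]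
    · -- y = 1, hence b = 8 since ¬ D
      have hy1' : y = 1 := by omega
      have hb : b = 8 := by
        by_contra hb8
        exact hD ⟨hy1', hb8⟩
      subst hy1'; subst hb
      decide
  · exact main_eq b y hy

theorem solution_changed : Claim_changed_solution := by
  unfold Claim_changed_solution; decide

theorem solution_tight : Claim_exact_solution := by
  intro b y _ hD
  rcases hD with ⟨hy1, hb⟩
  subst hy1
  have hA : solution b 1 = [3, 3] := by simp [solution]
  have hB : solution_alt b 1 = [] := by
    show solutionAltLoop (b - 4) 1 1 ((1 : Int).toNat + 1) = []
    have e : (1 : Int).toNat + 1 = 0 + 1 + 1 := by norm_num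
    rw [e]
    simp only [solutionAltLoop]
    have h1 : PySem.Int.mod 1 ((1 : Nat) : Int) = 0 := by decide
    have h2 : PySem.Int.floordiv 1 ((1 : Nat) : Int) = 1 := by decide
    have h3 : ¬ (2 * (((1 : Nat) : Int) + PySem.Int.floordiv 1 ((1 : Nat) : Int)) = b - 4) := by
      rw [h2]; push_cast; omega
    rw [if_pos (by norm_num), if_pos h1, if_neg h3]
    rw [if_neg (by norm_num)]
  rw [hA, hB]
  simp
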